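-- pv_equiv track=rewrite | github.com/bioduds/celflow | app/ai/system_controller.py | _extract_response_sections
-- ===== SOURCE A (Python) =====
-- from typing import Dict, List, Optional, Any, Union
--
-- def _extract_response_sections(response: str) -> Dict[str, str]:
--     """Extract structured sections from AI response"""
--     sections = {}
--     current_section = None
--     current_content = []
--
--     for line in response.split("\n"):
--         line = line.strip()
--         if line.startswith("**") and line.endswith(":**"):
--             # Save previous section
--             if current_section:
--                 sections[current_section] = "\n".join(current_content).strip()
--
--             # Start new section
--             current_section = line[2:-3]  # Remove ** and :**
--             current_content = []
--         elif current_section: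
--             current_content.append(line)
--
--     # Save last section
--     if current_section:
--         sections[current_section] = "\n".join(current_content).strip()
--
--     return sections
-- ===== SOURCE B (Python) =====
-- def _extract_response_sections(response):
--     """Extract structured sections from AI response (block-split rewrite)."""
--     lines = [ln.strip() for ln in response.split("\n")]
--     n = len(lines)
--     sections = {}
--     i = 0
--     while i < n:
--         ln = lines[i]
--         i += 1
--         if ln.startswith("**") and ln.endswith(":**"):
--             name = ln[2:-3]
--             start = i
--             while i < n and not (lines[i].startswith("**") and lines[i].endswith(":**")):
--                 i += 1
--             if name:
--                 sections[name] = "\n".join(lines[start:i]).strip()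
--     return sections
-- ===== Notes on version B (the rewrite author's own statement) =====
-- stated objective: alternative
-- what changed: A's single stateful scan carrying current_section/current_content with save-on-next-header is replaced by a block-split pass: pre-strip all lines, then for each header line take the slice of lines up to the next header as that section's content.
import Mathlib
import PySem

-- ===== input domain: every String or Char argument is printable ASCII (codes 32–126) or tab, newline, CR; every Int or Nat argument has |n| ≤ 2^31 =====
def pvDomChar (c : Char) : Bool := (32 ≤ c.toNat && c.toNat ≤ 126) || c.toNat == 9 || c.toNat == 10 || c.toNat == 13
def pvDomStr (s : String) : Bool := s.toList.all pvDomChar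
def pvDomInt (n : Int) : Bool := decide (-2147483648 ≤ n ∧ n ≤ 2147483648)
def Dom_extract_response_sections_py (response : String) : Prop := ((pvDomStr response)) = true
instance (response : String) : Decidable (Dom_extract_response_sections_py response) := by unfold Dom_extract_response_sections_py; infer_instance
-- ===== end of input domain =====

-- B replaces A's stateful current_section/current_content scan by a block-split pass
-- (find each header, take its content slice up to the next header); objective: alternative, same cost.


-- ===== PORT A =====
-- truthiness of current_section (None or a string): true iff a nonempty string
def pvTruthy : Option String → Bool
  | some s => s != ""
  | none => false

-- line.startswith("**") and line.endswith(":**")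
def pvIsHeader (l : String) : Bool :=
  PySem.Str.startswith l "**" && PySem.Str.endswith l ":**"

-- line[2:-3]
def pvHdrName (l : String) : String := PySem.Str.slice l (some 2) (some (-3))

-- 'if current_section: sections[current_section] = "\n".join(current_content).strip()'
-- (current_section is truthy iff it is a nonempty string)
def pvSave (d : PySem.Dict String String) (cur : Option String) (content : List String) :
    PySem.Dict String String :=
  match cur with
  | some s => if s = "" then d else d.insert s (PySem.Str.strip (PySem.Str.join "\n" content))
  | none => d

-- the for-loop of A, with its state (sections, current_section, current_content); final save at the end
def pvAGo : List String → PySem.Dict String String → Option String → List String →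
    PySem.Dict String String
  | [], d, cur, content => pvSave d cur content
  | l :: ls, d, cur, content =>
    let l := PySem.Str.strip l
    if pvIsHeader l then
      pvAGo ls (pvSave d cur content) (some (pvHdrName l)) []
    else if pvTruthy cur then
      pvAGo ls d cur (content ++ [l])
    else
      pvAGo ls d cur content

def extract_response_sections_py (response : String) : List (String × String) :=
  (pvAGo ((PySem.Str.split? response "\n").getD []) PySem.Dict.empty none []).items

-- ===== PORT B =====
-- B's outer while-loop over pre-stripped lines: at a header, the inner while-scan to the next
-- header is the takeWhile/dropWhile split of the remaining lines
def pvBGo : List String → PySem.Dict String String → PySem.Dict String String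
  | [], d => d
  | l :: ls, d =>
    if pvIsHeader l then
      let name := pvHdrName l
      let content := ls.takeWhile (fun x => !pvIsHeader x)
      let rest := ls.dropWhile (fun x => !pvIsHeader x)
      pvBGo rest (if name = "" then d
                  else d.insert name (PySem.Str.strip (PySem.Str.join "\n" content)))
    else
      pvBGo ls d
  termination_by ls => ls.length
  decreasing_by
  · exact Nat.lt_succ_of_le (List.length_dropWhile_le _ _)
  · exact Nat.lt_succ_self _

def extract_response_sections_py_alt (response : String) : List (String × String) :=
  (pvBGo (((PySem.Str.split? response "\n").getD []).map PySem.Str.strip) PySem.Dict.empty).items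

-- ===== PRECONDITION & SPEC =====
def Spec_extract_response_sections_py (response : String) (out : List (String × String)) : Prop := out = extract_response_sections_py_alt response
instance (response : String) (out : List (String × String)) : Decidable (Spec_extract_response_sections_py response out) := by unfold Spec_extract_response_sections_py; infer_instance

-- ===== CLAIM (what is proved, stated in full; the proofs are below) =====
def Claim_equal_extract_response_sections_py : Prop := ∀ (response : String), Dom_extract_response_sections_py response → Spec_extract_response_sections_py response (extract_response_sections_py response)

-- ===== LEMMAS AND PROOFS =====

-- unfolding equations for B's well-founded recursion
theorem pvBGo_cons_header {l : String} (ls : List String) (d : PySem.Dict String String)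
    (h : pvIsHeader l = true) :
    pvBGo (l :: ls) d =
      pvBGo (ls.dropWhile (fun x => !pvIsHeader x))
        (if pvHdrName l = "" then d
         else d.insert (pvHdrName l)
           (PySem.Str.strip (PySem.Str.join "\n" (ls.takeWhile (fun x => !pvIsHeader x))))) := by
  rw [pvBGo.eq_def]; simp [h]

theorem pvBGo_cons_nonheader {l : String} (ls : List String) (d : PySem.Dict String String)
    (h : ¬ pvIsHeader l = true) :
    pvBGo (l :: ls) d = pvBGo ls d := by
  rw [pvBGo.eq_def]; simp [h]

-- B skips non-header lines one at a time, so dropping a non-header prefix changes nothing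
theorem pvBGo_dropWhile (xs : List String) (d : PySem.Dict String String) :
    pvBGo (xs.dropWhile (fun x => !pvIsHeader x)) d = pvBGo xs d := by
  induction xs with
  | nil => rfl
  | cons x xs ih =>
    by_cases h : pvIsHeader x
    · simp [h]
    · simp only [List.dropWhile_cons, h, Bool.not_false, if_pos]
      rw [ih, pvBGo_cons_nonheader xs d (by simp [h])]

-- the joint invariant: A's scan state corresponds to B's block split of the remaining lines
theorem pvGo_eq (ls : List String) :
    (∀ (d : PySem.Dict String String) (content : List String) (cur : Option String),
        (cur = none ∨ cur = some "") →
        pvAGo ls d cur content = pvBGo (ls.map PySem.Str.strip) d) ∧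
    (∀ (d : PySem.Dict String String) (content : List String) (s : String), s ≠ "" →
        pvAGo ls d (some s) content =
          pvBGo ((ls.map PySem.Str.strip).dropWhile (fun x => !pvIsHeader x))
            (d.insert s (PySem.Str.strip (PySem.Str.join "\n"
              (content ++ (ls.map PySem.Str.strip).takeWhile (fun x => !pvIsHeader x)))))) := by
  induction ls with
  | nil =>
    constructor
    · rintro d content cur (rfl | rfl) <;> simp [pvAGo, pvSave, pvBGo]
    · intro d content s hs
      simp [pvAGo, pvSave, pvBGo, hs]
  | cons l ls ih =>
    constructor
    · intro d content cur hcur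
      have hsv : pvSave d cur content = d := by
        rcases hcur with rfl | rfl <;> simp [pvSave]
      have htr : pvTruthy cur = false := by
        rcases hcur with rfl | rfl <;> simp [pvTruthy]
      rw [pvAGo, List.map_cons]
      by_cases h : pvIsHeader (PySem.Str.strip l)
      · simp only [h, if_pos, hsv]
        rw [pvBGo_cons_header _ _ h]
        by_cases hn : pvHdrName (PySem.Str.strip l) = ""
        · rw [hn, if_pos rfl, pvBGo_dropWhile (ls.map PySem.Str.strip)]
          exact (ih.1 d [] (some "")) (Or.inr rfl)
        · rw [if_neg hn]
          simpa using ih.2 d [] _ hn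
      · simp only [h, Bool.false_eq_true, if_neg, not_false_iff, htr]
        rw [pvBGo_cons_nonheader _ _ (by simp [h])]
        exact ih.1 d content cur hcur
    · intro d content s hs
      have hsave' : pvSave d (some s) content =
          d.insert s (PySem.Str.strip (PySem.Str.join "\n" content)) := by
        simp [pvSave, hs]
      by_cases h : pvIsHeader (PySem.Str.strip l)
      · rw [pvAGo]
        simp only [h, if_pos, List.map_cons, List.dropWhile_cons, List.takeWhile_cons,
          Bool.not_true, if_neg, Bool.false_eq_true, not_false_iff, List.append_nil]
        rw [pvBGo_cons_header _ _ h, hsave']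
        by_cases hn : pvHdrName (PySem.Str.strip l) = ""
        · rw [hn, if_pos rfl, pvBGo_dropWhile (ls.map PySem.Str.strip)]
          have := (ih.1 (pvSave d (some s) content) [] (some "")) (Or.inr rfl)
          simpa [hsave'] using this
        · rw [if_neg hn]
          have := ih.2 (pvSave d (some s) content) [] _ hn
          simpa [hsave'] using this
      · rw [pvAGo]
        simp only [h, if_neg, Bool.false_eq_true, not_false_iff, pvTruthy, hs, bne_iff_ne,
          ne_eq, if_pos, List.map_cons, List.dropWhile_cons, List.takeWhile_cons,
          Bool.not_false, if_pos]
        have := ih.2 d (content ++ [PySem.Str.strip l]) s hs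
        rw [this, List.append_assoc]
        rfl

-- ===== VERDICT (by name: the statement is the Claim_ definition above) =====
theorem extract_response_sections_py_spec : Claim_equal_extract_response_sections_py := by
  intro response _
  unfold Spec_extract_response_sections_py extract_response_sections_py extract_response_sections_py_alt
  rw [(pvGo_eq _).1 _ [] none (Or.inl rfl)]
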